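-- pv_equiv track=rewrite | github.com/Morneplaine/EVE | eve_launcher.py | _normalize_inventory_key
-- ===== SOURCE A (Python) =====
-- def _normalize_inventory_key(name, required_keys):
--     """Match pasted item name to an aggregated key (exact or case-insensitive)."""
--     name = (name or "").strip()
--     if name in required_keys:
--         return name
--     lower = name.lower()
--     for k in required_keys:
--         if k.lower() == lower:
--             return k
--     return name
-- ===== SOURCE B (Python) =====
-- def _normalize_inventory_key(name, required_keys):
--     """Match pasted item name to an aggregated key (exact or case-insensitive)."""
--     # Single fused pass: early-return on an exact match, remember the first
--     # case-insensitive match in an accumulator, fall back to it (then to name).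
--     name = (name or "").strip()
--     lower = name.lower()
--     ci = None
--     for k in required_keys:
--         if k == name:
--             return name
--         if ci is None and k.lower() == lower:
--             ci = k
--     return ci if ci is not None else name
-- ===== Notes on version B (the rewrite author's own statement) =====
-- stated objective: alternative
-- what changed: A makes two staged passes (a membership test for an exact match, then a scan comparing lowercased keys); B makes one fused pass that early-returns on an exact match while carrying the first case-insensitive match in an accumulator.
import Mathlib
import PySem

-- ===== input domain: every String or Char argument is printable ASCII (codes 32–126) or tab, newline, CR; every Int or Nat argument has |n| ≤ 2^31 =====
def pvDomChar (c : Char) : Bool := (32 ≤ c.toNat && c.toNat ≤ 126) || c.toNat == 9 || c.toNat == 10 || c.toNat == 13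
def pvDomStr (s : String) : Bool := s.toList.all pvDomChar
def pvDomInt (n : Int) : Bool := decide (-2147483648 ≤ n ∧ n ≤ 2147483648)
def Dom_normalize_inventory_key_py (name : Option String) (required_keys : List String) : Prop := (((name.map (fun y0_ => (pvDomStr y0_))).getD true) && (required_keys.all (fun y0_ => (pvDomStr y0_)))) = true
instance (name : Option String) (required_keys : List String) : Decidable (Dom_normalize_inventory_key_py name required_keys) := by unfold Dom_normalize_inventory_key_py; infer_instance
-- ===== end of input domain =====

-- B replaces A's two staged passes (membership test, then lowercase scan) with one fused pass carrying the first case-insensitive match in an accumulator (alternative).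
-- recursive pass carrying the first case-insensitive match in an accumulator (alternative).


-- ===== PORT A =====
def normalize_inventory_key_py (name : Option String) (required_keys : List String) : String :=
  let name := PySem.Str.strip (name.getD "")
  if required_keys.contains name then name
  else
    let lower := PySem.Str.lower name
    -- 'for k in required_keys: if k.lower() == lower: return k' = first match
    match required_keys.find? (fun k => PySem.Str.lower k == lower) with
    | some k => k
    | none => name

-- ===== PORT B =====
-- helper: transliteration of B's single loop (early return on exact match, accumulator ci)
def normalize_inventory_key_py_alt_match (name lower : String) (keys : List String) (ci : Option String) : String :=
  match keys with
  | [] => ci.getD name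
  | k :: rest =>
    if k == name then name
    else
      let ci := if ci.isNone && (PySem.Str.lower k == lower) then some k else ci
      normalize_inventory_key_py_alt_match name lower rest ci

def normalize_inventory_key_py_alt (name : Option String) (required_keys : List String) : String :=
  let name := PySem.Str.strip (name.getD "")
  normalize_inventory_key_py_alt_match name (PySem.Str.lower name) required_keys none

-- ===== PRECONDITION & SPEC =====
def Spec_normalize_inventory_key_py (name : Option String) (required_keys : List String) (out : String) : Prop := out = normalize_inventory_key_py_alt name required_keys
instance (name : Option String) (required_keys : List String) (out : String) : Decidable (Spec_normalize_inventory_key_py name required_keys out) := by unfold Spec_normalize_inventory_key_py; infer_instance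

-- ===== CLAIM (what is proved, stated in full; the proofs are below) =====
def Claim_equal_normalize_inventory_key_py : Prop := ∀ (name : Option String) (required_keys : List String), Dom_normalize_inventory_key_py name required_keys → Spec_normalize_inventory_key_py name required_keys (normalize_inventory_key_py name required_keys)

-- ===== LEMMAS AND PROOFS =====

-- characterisation of the single-pass helper in terms of A's two passes
theorem alt_match_eq (name lower : String) (keys : List String) (ci : Option String) :
    normalize_inventory_key_py_alt_match name lower keys ci
      = if keys.contains name then name
        else ((ci.orElse (fun _ => keys.find? (fun k => PySem.Str.lower k == lower))).getD name) := by
  induction keys generalizing ci with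
  | nil => simp [normalize_inventory_key_py_alt_match]
  | cons k rest ih =>
    simp only [normalize_inventory_key_py_alt_match, List.find?]
    by_cases hk : (k == name) = true
    · have hkn : k = name := by simpa using hk
      subst hkn
      simp [List.contains_cons]
    · rw [if_neg hk, ih]
      have hne : (name == k) = false := by
        refine beq_eq_false_iff_ne.mpr ?_
        intro h; exact hk (by simp [h])
      have hc : ((k :: rest).contains name) = rest.contains name := by
        rw [List.contains_cons, hne, Bool.false_or]
      rw [hc]
      by_cases hm : rest.contains name = true
      · rw [if_pos hm, if_pos hm]
      · rw [if_neg hm, if_neg hm]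
        cases ci with
        | some c => simp [Option.orElse]
        | none =>
          by_cases hp : (PySem.Str.lower k == lower) = true
          · simp [hp, Option.orElse]
          · simp [hp, Option.orElse]

-- ===== VERDICT (by name: the statement is the Claim_ definition above) =====
theorem normalize_inventory_key_py_spec : Claim_equal_normalize_inventory_key_py := by
  intro name required_keys _
  unfold Spec_normalize_inventory_key_py normalize_inventory_key_py normalize_inventory_key_py_alt
  rw [alt_match_eq]
  simp only [Option.orElse]
  split_ifs with h
  · rfl
  · cases hf : required_keys.find? (fun k => PySem.Str.lower k == PySem.Str.lower (PySem.Str.strip (name.getD ""))) <;> simp
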